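-- pv_equiv track=rewrite | github.com/stresszero/code_snippets | String/two_way_string_matching.py | max_suffix
-- ===== SOURCE A (Python) =====
-- def max_suffix(s):
--     """
--     최대 접미사의 위치 계산
--
--     Args:
--         s (str): 문자열
--
--     Returns:
--         int: 최대 접미사의 위치
--     """
--     m = len(s)
--     ms = -1  # 최대 접미사 위치
--     j = 0  # 현재 후보의 위치
--     k = 1  # 현재 비교 길이
--
--     while j + k < m:
--         if s[j + k] < s[ms + k]:
--             j += k
--             k = 1
--             ms = j - 1
--         elif s[j + k] > s[ms + k]:
--             ms = j
--             j = ms + 1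
--             k = 1
--         else:
--             k += 1
--
--     return j
-- ===== SOURCE B (Python) =====
-- def max_suffix(s):
--     # A's state machine keeps the invariant ms == j - 1, so it only ever
--     # compares adjacent characters; its result is len(s) minus the length of
--     # the trailing run of equal characters.  Scan back from the end instead.
--     if not s:
--         return 0
--     i = len(s) - 1
--     while i > 0 and s[i - 1] == s[i]:
--         i -= 1
--     return i
-- ===== Notes on version B (the rewrite author's own statement) =====
-- stated objective: faster
-- what changed: A's j/k/ms state machine always has ms = j-1, so it only compares adjacent characters and returns len(s) minus the trailing run of equal characters; B computes that directly by one backward scan from the end, removing the rescans of A's greater-than branch (A re-reads a length-k block after advancing j by one, which is quadratic on ascending strings).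
import Mathlib
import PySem

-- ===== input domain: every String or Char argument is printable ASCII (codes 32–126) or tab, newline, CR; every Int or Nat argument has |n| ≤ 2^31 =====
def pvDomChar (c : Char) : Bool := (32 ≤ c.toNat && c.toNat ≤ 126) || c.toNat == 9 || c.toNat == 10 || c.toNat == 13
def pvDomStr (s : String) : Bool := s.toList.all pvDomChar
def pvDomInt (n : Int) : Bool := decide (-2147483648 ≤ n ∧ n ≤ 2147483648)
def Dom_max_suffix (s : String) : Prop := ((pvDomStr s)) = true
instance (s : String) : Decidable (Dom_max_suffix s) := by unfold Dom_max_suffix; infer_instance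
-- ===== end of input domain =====

-- B replaces A's three-variable state machine by a single backward scan for the
-- start of the trailing run of equal characters (same value everywhere).

-- ===== PORT A =====
-- literal port of A's while-loop: state (ms, j, k); s[x] via PySem.List.pyGet?
-- (both indices are always in range when called from max_suffix, the `| _, _` arm is a totality guard)
def maxSuffixLoopA (cs : List Char) (ms : Int) (j k : Nat) : Int :=
  if _h : j + k < cs.length then
    match PySem.List.pyGet? cs (↑(j + k)), PySem.List.pyGet? cs (ms + ↑k) with
    | some a, some b =>
      if a < b then maxSuffixLoopA cs (↑(j + k) - 1) (j + k) 1
      else if b < a then maxSuffixLoopA cs (↑j) (j + 1) 1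
      else maxSuffixLoopA cs ms j (k + 1)
    | _, _ => (↑j : Int)
  else (↑j : Int)
termination_by (cs.length - j, cs.length - (j + k))
decreasing_by
  · rcases Nat.eq_zero_or_pos k with hk | hk
    · subst hk; simp only [Nat.add_zero]; right; omega
    · left; omega
  · left; omega
  · right; omega

def max_suffix (s : String) : Int :=
  maxSuffixLoopA s.toList (-1) 0 1

-- ===== PORT B =====
-- literal port of Source B: backward scan while s[i-1] == s[i]
def maxSuffixLoopB (cs : List Char) (i : Nat) : Nat :=
  if _h : 0 < i ∧ PySem.List.pyGet? cs ((↑i : Int) - 1) = PySem.List.pyGet? cs (↑i : Int) then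
    maxSuffixLoopB cs (i - 1)
  else i
termination_by i
decreasing_by omega

def max_suffix_alt (s : String) : Int :=
  if s.toList.length = 0 then 0
  else ↑(maxSuffixLoopB s.toList (s.toList.length - 1))

-- ===== PRECONDITION & SPEC =====
def Spec_max_suffix (s : String) (out : Int) : Prop := out = max_suffix_alt s
instance (s : String) (out : Int) : Decidable (Spec_max_suffix s out) := by unfold Spec_max_suffix; infer_instance

-- ===== CLAIM (what is proved, stated in full; the proofs are below) =====
def Claim_equal_max_suffix : Prop := ∀ (s : String), Dom_max_suffix s → Spec_max_suffix s (max_suffix s)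

-- ===== LEMMAS AND PROOFS =====

-- "all adjacent characters from position q on are equal"
def pvAllEq (cs : List Char) (q : Nat) : Prop :=
  ∀ t, q ≤ t + 1 → t + 1 < cs.length → cs[t]? = cs[t + 1]?

-- B's loop stops exactly at the start of a run whose left boundary differs (or at 0)
theorem loopB_eq (cs : List Char) (p : Nat) :
    ∀ i, p ≤ i → i < cs.length →
    (∀ t, p ≤ t → t + 1 ≤ i → cs[t]? = cs[t + 1]?) →
    (p = 0 ∨ cs[p - 1]? ≠ cs[p]?) →
    maxSuffixLoopB cs i = p := by
  intro i
  induction i with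
  | zero =>
    intro hpi _ _ _
    rw [maxSuffixLoopB]
    simp only [Nat.lt_irrefl, false_and, dite_false]
    omega
  | succ n ih =>
    intro hpi hlen hrun hbd
    rw [maxSuffixLoopB]
    by_cases hp : p = n + 1
    · subst hp
      have hne : cs[n]? ≠ cs[n + 1]? := by
        rcases hbd with h0 | h0
        · omega
        · simpa using h0
      have : ¬ (0 < n + 1 ∧ PySem.List.pyGet? cs ((↑(n + 1) : Int) - 1) = PySem.List.pyGet? cs (↑(n + 1) : Int)) := by
        rintro ⟨-, heq⟩
        apply hne
        have h1 : ((↑(n + 1) : Int) - 1) = ((n : Nat) : Int) := by push_cast; ring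
        rw [h1, PySem.List.pyGet?_natCast, PySem.List.pyGet?_natCast] at heq
        exact heq
      rw [dif_neg this]
    · have hpn : p ≤ n := by omega
      have heq : cs[n]? = cs[n + 1]? := hrun n hpn (by omega)
      have hcond : (0 < n + 1 ∧ PySem.List.pyGet? cs ((↑(n + 1) : Int) - 1) = PySem.List.pyGet? cs (↑(n + 1) : Int)) := by
        refine ⟨by omega, ?_⟩
        have h1 : ((↑(n + 1) : Int) - 1) = ((n : Nat) : Int) := by push_cast; ring
        rw [h1, PySem.List.pyGet?_natCast, PySem.List.pyGet?_natCast]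
        exact heq
      rw [dif_pos hcond]
      simp only [Nat.add_sub_cancel]
      exact ih hpn (by omega) (fun t ht ht' => hrun t ht (by omega)) hbd

-- A's loop characterisation on its reachable states (ms = j - 1, k ≥ 1)
theorem loopA_char (cs : List Char) (ms : Int) (j k : Nat)
    (hms : ms = (j : Int) - 1) (hk : 1 ≤ k) :
    (pvAllEq cs (j + k) → maxSuffixLoopA cs ms j k = (↑j : Int))
    ∧ (¬ pvAllEq cs (j + k) →
        maxSuffixLoopA cs ms j k = ↑(maxSuffixLoopB cs (cs.length - 1))) := by
  revert hms hk
  induction ms, j, k using maxSuffixLoopA.induct cs with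
  | case1 ms j k h a b hb ha hab ih =>
    intro hms hk
    have hidx : ms + (k : Int) = ((j + k - 1 : Nat) : Int) := by push_cast [hms]; omega
    have hb' : cs[j + k - 1]? = some b := by
      rw [hidx, PySem.List.pyGet?_natCast] at hb; exact hb
    have ha' : cs[j + k]? = some a := by
      rw [PySem.List.pyGet?_natCast] at ha; exact ha
    obtain ⟨ih1, ih2⟩ := ih (by push_cast; ring) (le_refl 1)
    have hneq : ¬ pvAllEq cs (j + k) := by
      intro hall
      have := hall (j + k - 1) (by omega) (by omega)
      rw [hb', show j + k - 1 + 1 = j + k by omega, ha'] at this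
      exact absurd (Option.some.inj this) (by intro hba; rw [hba] at hab; exact lt_irrefl a hab)
    refine ⟨fun hall => absurd hall hneq, fun _ => ?_⟩
    rw [maxSuffixLoopA, dif_pos h]
    simp only [ha, hb, hab, if_pos]
    by_cases hall : pvAllEq cs (j + k + 1)
    · rw [ih1 hall]
      congr 1
      refine (loopB_eq cs (j + k) (cs.length - 1) (by omega) (by omega) ?_ (Or.inr ?_)).symm
      · intro t ht ht'
        exact hall t (by omega) (by omega)
      · rw [hb', ha']
        intro hcon
        exact absurd (Option.some.inj hcon) (by intro hba; rw [hba] at hab; exact lt_irrefl a hab)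
    · exact ih2 hall
  | case2 ms j k h a b hb ha hab hba ih =>
    intro hms hk
    have hidx : ms + (k : Int) = ((j + k - 1 : Nat) : Int) := by push_cast [hms]; omega
    have hb' : cs[j + k - 1]? = some b := by
      rw [hidx, PySem.List.pyGet?_natCast] at hb; exact hb
    have ha' : cs[j + k]? = some a := by
      rw [PySem.List.pyGet?_natCast] at ha; exact ha
    obtain ⟨ih1, ih2⟩ := ih (by push_cast; ring) (le_refl 1)
    have hne_ab : (some a : Option Char) ≠ some b := by
      intro hcon
      exact absurd (Option.some.inj hcon) (by intro hab'; rw [hab'] at hba; exact lt_irrefl b hba)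
    have hneq : ¬ pvAllEq cs (j + k) := by
      intro hall
      have := hall (j + k - 1) (by omega) (by omega)
      rw [hb', show j + k - 1 + 1 = j + k by omega, ha'] at this
      exact hne_ab this.symm
    refine ⟨fun hall => absurd hall hneq, fun _ => ?_⟩
    rw [maxSuffixLoopA, dif_pos h]
    simp only [ha, hb, hab, hba, if_pos, if_false]
    by_cases hall : pvAllEq cs (j + 1 + 1)
    · have hk1 : k = 1 := by
        by_contra hk2
        have ht := hall (j + k - 1) (by omega) (by omega)
        rw [hb', show j + k - 1 + 1 = j + k by omega, ha'] at ht
        exact hne_ab ht.symm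
      subst hk1
      rw [ih1 hall]
      congr 1
      refine (loopB_eq cs (j + 1) (cs.length - 1) (by omega) (by omega) ?_ (Or.inr ?_)).symm
      · intro t ht ht'
        exact hall t (by omega) (by omega)
      · rw [show (j + 1) - 1 = j from rfl]
        rw [show j + 1 - 1 = j from rfl] at hb'
        rw [hb', ha']
        intro hcon
        exact hne_ab hcon.symm
    · exact ih2 hall
  | case3 ms j k h a b hb ha hab hba ih =>
    intro hms hk
    have heqc : a = b := le_antisymm (not_lt.mp hba) (not_lt.mp hab)
    have hidx : ms + (k : Int) = ((j + k - 1 : Nat) : Int) := by push_cast [hms]; omega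
    have hb' : cs[j + k - 1]? = some b := by
      rw [hidx, PySem.List.pyGet?_natCast] at hb; exact hb
    have ha' : cs[j + k]? = some a := by
      rw [PySem.List.pyGet?_natCast] at ha; exact ha
    have hadj : cs[j + k - 1]? = cs[j + k]? := by rw [hb', ha', heqc]
    obtain ⟨ih1, ih2⟩ := ih hms (by omega)
    have hiff : pvAllEq cs (j + k) ↔ pvAllEq cs (j + (k + 1)) := by
      constructor
      · intro hall t ht ht'; exact hall t (by omega) ht'
      · intro hall t ht ht'
        by_cases hcase : j + k + 1 ≤ t + 1
        · exact hall t (by omega) ht'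
        · have : t = j + k - 1 := by omega
          subst this
          rw [show j + k - 1 + 1 = j + k by omega]
          exact hadj
    constructor
    · intro hall
      rw [maxSuffixLoopA, dif_pos h]
      simp only [ha, hb, hab, hba, if_false]
      exact ih1 (hiff.mp hall)
    · intro hne
      rw [maxSuffixLoopA, dif_pos h]
      simp only [ha, hb, hab, hba, if_false]
      exact ih2 (fun hc => hne (hiff.mpr hc))
  | case4 ms j k h hnone =>
    intro hms hk
    exfalso
    have hidx : ms + (k : Int) = ((j + k - 1 : Nat) : Int) := by push_cast [hms]; omega
    have ha : PySem.List.pyGet? cs ((j + k : Nat) : Int) = some cs[j + k] := by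
      rw [PySem.List.pyGet?_natCast]
      exact List.getElem?_eq_getElem h
    have hb : PySem.List.pyGet? cs (ms + (k : Int)) = some cs[j + k - 1] := by
      rw [hidx, PySem.List.pyGet?_natCast]
      exact List.getElem?_eq_getElem (by omega)
    exact hnone _ _ ha hb
  | case5 ms j k h =>
    intro hms hk
    have hall : pvAllEq cs (j + k) := by
      intro t ht ht'; omega
    exact ⟨fun _ => by rw [maxSuffixLoopA, dif_neg h], fun hne => absurd hall hne⟩

theorem max_suffix_spec : Claim_equal_max_suffix := by
  intro s _
  unfold Spec_max_suffix max_suffix max_suffix_alt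
  have := loopA_char s.toList (-1) 0 1 (by norm_num) (le_refl 1)
  obtain ⟨h1, h2⟩ := this
  by_cases hlen : s.toList.length = 0
  · rw [if_pos hlen]
    apply h1
    intro t ht ht'; omega
  · rw [if_neg hlen]
    by_cases hall : pvAllEq s.toList (0 + 1)
    · rw [h1 hall]
      have : maxSuffixLoopB s.toList (s.toList.length - 1) = 0 := by
        refine loopB_eq s.toList 0 (s.toList.length - 1) (by omega) (by omega) ?_ (Or.inl rfl)
        intro t ht ht'
        exact hall t (by omega) (by omega)
      rw [this]
    · exact h2 hall
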